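-- pv_equiv track=rewrite | github.com/Artem7898/Test_Yandex | input.py | spell_strength
-- ===== SOURCE A (Python) =====
-- def spell_strength(s, m, d):
--     strength = 0
--     character_counts = [0] * 26
--
--     for i in range(len(s)):
--         k = ord(s[i]) - ord('a')
--         m_i = m[i]
--
--         if m_i == 0:
--             character_counts[k] += 1
--         else:
--             new_k = (k + (m_i - 1) * d[i]) % 26
--             character_counts[new_k] += 1
--
--     for count in character_counts:
--         if count > 0:
--             strength += 1
--
--     return strength
-- ===== SOURCE B (Python) =====
-- def spell_strength(s, m, d):
--     keys = sorted(
--         (ord(s[i]) - ord('a')) % 26 if m[i] == 0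
--         else (ord(s[i]) - ord('a') + (m[i] - 1) * d[i]) % 26
--         for i in range(len(s))
--     )
--     if not keys:
--         return 0
--     changes = 0
--     for prev, cur in zip(keys, keys[1:]):
--         if cur != prev:
--             changes += 1
--     return 1 + changes
-- ===== Notes on version B (the rewrite author's own statement) =====
-- stated objective: alternative
-- what changed: B replaces A's 26-bucket frequency array and the bucket-scanning second pass by a sort-then-scan: it collects the transformed keys, sorts them, and counts boundaries between adjacent unequal elements (1 + number of adjacent changes).
import Mathlib
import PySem

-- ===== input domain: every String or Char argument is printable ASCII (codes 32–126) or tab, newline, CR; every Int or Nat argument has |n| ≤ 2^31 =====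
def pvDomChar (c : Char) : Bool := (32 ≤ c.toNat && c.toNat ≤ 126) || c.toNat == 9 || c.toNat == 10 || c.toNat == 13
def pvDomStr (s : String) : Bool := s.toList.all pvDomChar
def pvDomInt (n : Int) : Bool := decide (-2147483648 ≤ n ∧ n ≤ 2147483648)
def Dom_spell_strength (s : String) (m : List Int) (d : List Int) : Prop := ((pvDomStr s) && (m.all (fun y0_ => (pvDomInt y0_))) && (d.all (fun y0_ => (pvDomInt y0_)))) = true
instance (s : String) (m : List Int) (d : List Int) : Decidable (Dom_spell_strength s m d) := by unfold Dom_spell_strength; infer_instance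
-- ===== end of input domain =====

-- B replaces A's 26-bucket frequency array and bucket-scanning second pass by sort-then-scan: sort the transformed keys and count adjacent changes (objective: alternative).

-- ===== PORT A =====
def spell_strength (s : String) (m : List Int) (d : List Int) : Int :=
  let cs := s.toList
  let counts :=
    (PySem.List.pyRange 0 cs.length 1).foldl
      (fun counts i =>
        let k : Int := ((PySem.List.pyGetD cs i ' ').toNat : Int) - 97
        let m_i := PySem.List.pyGetD m i 0
        if m_i = 0 then
          PySem.List.pySetD counts k (PySem.List.pyGetD counts k 0 + 1)
        else
          let new_k := PySem.Int.mod (k + (m_i - 1) * PySem.List.pyGetD d i 0) 26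
          PySem.List.pySetD counts new_k (PySem.List.pyGetD counts new_k 0 + 1))
      (List.replicate 26 (0 : Int))
  counts.foldl (fun strength count => if count > 0 then strength + 1 else strength) 0

-- ===== PORT B =====
def spell_strength_alt (s : String) (m : List Int) (d : List Int) : Int :=
  let cs := s.toList
  let keys := PySem.List.sorted
    ((PySem.List.pyRange 0 cs.length 1).map (fun i =>
      if PySem.List.pyGetD m i 0 = 0 then
        PySem.Int.mod (((PySem.List.pyGetD cs i ' ').toNat : Int) - 97) 26
      else
        PySem.Int.mod (((PySem.List.pyGetD cs i ' ').toNat : Int) - 97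
          + (PySem.List.pyGetD m i 0 - 1) * PySem.List.pyGetD d i 0) 26))
    (fun x => x) false
  if keys = [] then 0
  else
    1 + (keys.zip (PySem.List.slice keys (some 1) none)).foldl
      (fun changes pc => if pc.2 ≠ pc.1 then changes + 1 else changes) 0

-- ===== PRECONDITION & SPEC =====
-- Pre_ is exactly where the Python A returns: m must cover every index of s; where m[i] == 0 the
-- character code must lie in [71,122] (otherwise character_counts[k] is an IndexError even after
-- Python's negative wraparound); where m[i] != 0, d must have an entry at i.
def Pre_spell_strength (s : String) (m : List Int) (d : List Int) : Prop :=
  s.toList.length ≤ m.length ∧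
  ∀ i : Nat, i < s.toList.length →
    (if m.getD i 0 = 0
     then 71 ≤ (s.toList.getD i ' ').toNat ∧ (s.toList.getD i ' ').toNat ≤ 122
     else i < d.length)
instance (s : String) (m : List Int) (d : List Int) : Decidable (Pre_spell_strength s m d) := by
  unfold Pre_spell_strength; infer_instance

def pvWitness_spell_strength : String × List Int × List Int := ("aXb", [0, 3, 0], [5, 7])

def Spec_spell_strength (s : String) (m : List Int) (d : List Int) (out : Int) : Prop := out = spell_strength_alt s m d
instance (s : String) (m : List Int) (d : List Int) (out : Int) : Decidable (Spec_spell_strength s m d out) := by unfold Spec_spell_strength; infer_instance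

-- ===== CLAIM (what is proved, stated in full; the proofs are below) =====
def Claim_equal_spell_strength : Prop := ∀ (s : String) (m : List Int) (d : List Int), Dom_spell_strength s m d → Pre_spell_strength s m d → Spec_spell_strength s m d (spell_strength s m d)

-- ===== LEMMAS AND PROOFS =====

-- The effective bucket (in [0,26)) that iteration i touches, shared by both proofs.
def pvKey (s : String) (m : List Int) (d : List Int) (i : Int) : Int :=
  let k : Int := ((PySem.List.pyGetD s.toList i ' ').toNat : Int) - 97
  let m_i := PySem.List.pyGetD m i 0
  if m_i = 0 then PySem.Int.mod k 26
  else PySem.Int.mod (k + (m_i - 1) * PySem.List.pyGetD d i 0) 26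

def pvStepA (s : String) (m : List Int) (d : List Int) : List Int → Int → List Int :=
  fun counts i =>
    let k : Int := ((PySem.List.pyGetD s.toList i ' ').toNat : Int) - 97
    let m_i := PySem.List.pyGetD m i 0
    if m_i = 0 then
      PySem.List.pySetD counts k (PySem.List.pyGetD counts k 0 + 1)
    else
      let new_k := PySem.Int.mod (k + (m_i - 1) * PySem.List.pyGetD d i 0) 26
      PySem.List.pySetD counts new_k (PySem.List.pyGetD counts new_k 0 + 1)

lemma spell_strength_eq (s : String) (m : List Int) (d : List Int) :
    spell_strength s m d =
      ((PySem.List.pyRange 0 s.toList.length 1).foldl (pvStepA s m d)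
        (List.replicate 26 (0 : Int))).foldl
        (fun strength count => if count > 0 then strength + 1 else strength) 0 := rfl

lemma spell_strength_alt_eq (s : String) (m : List Int) (d : List Int) :
    spell_strength_alt s m d =
      (let ks := PySem.List.sorted ((PySem.List.pyRange 0 s.toList.length 1).map (pvKey s m d)) (fun x => x) false
       if ks = [] then 0
       else 1 + (ks.zip (PySem.List.slice ks (some 1) none)).foldl
         (fun changes pc => if pc.2 ≠ pc.1 then changes + 1 else changes) 0) := by
  have hf : (fun (i : Int) =>
      if PySem.List.pyGetD m i 0 = 0 then
        PySem.Int.mod (((PySem.List.pyGetD s.toList i ' ').toNat : Int) - 97) 26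
      else
        PySem.Int.mod (((PySem.List.pyGetD s.toList i ' ').toNat : Int) - 97
          + (PySem.List.pyGetD m i 0 - 1) * PySem.List.pyGetD d i 0) 26)
      = pvKey s m d := by
    funext i
    simp only [pvKey]
  show (let ks := PySem.List.sorted ((PySem.List.pyRange 0 s.toList.length 1).map _) (fun x => x) false
        if ks = [] then 0 else _) = _
  rw [hf]

lemma pvKey_bounds (s : String) (m : List Int) (d : List Int) (i : Int) :
    0 ≤ pvKey s m d i ∧ pvKey s m d i < 26 := by
  by_cases h : PySem.List.pyGetD m i 0 = 0
  · simp only [pvKey, h, if_true]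
    rw [PySem.Int.mod_eq_emod_of_pos (by norm_num)]; omega
  · simp only [pvKey, h, if_false]
    rw [PySem.Int.mod_eq_emod_of_pos (by norm_num)]; omega

lemma pvIdx26 (k : Int) (h1 : -26 ≤ k) (h2 : k < 26) :
    PySem.List.pyIdx? 26 k = some (PySem.Int.mod k 26).toNat := by
  rw [PySem.Int.mod_eq_emod_of_pos (by norm_num)]
  unfold PySem.List.pyIdx?
  split_ifs <;> first | (exfalso; omega) | (congr 1; omega)

lemma pvGetD26 (c : List Int) (hc : c.length = 26) (k : Int) (h1 : -26 ≤ k) (h2 : k < 26) :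
    PySem.List.pyGetD c k 0 = c.getD (PySem.Int.mod k 26).toNat 0 := by
  unfold PySem.List.pyGetD PySem.List.pyGet?
  rw [hc, pvIdx26 k h1 h2]
  simp [List.getD_eq_getElem?_getD]

lemma pvSetD26 (c : List Int) (hc : c.length = 26) (k : Int) (h1 : -26 ≤ k) (h2 : k < 26) (v : Int) :
    PySem.List.pySetD c k v = c.set (PySem.Int.mod k 26).toNat v := by
  unfold PySem.List.pySetD PySem.List.pySet?
  rw [hc, pvIdx26 k h1 h2]
  rfl

lemma pvStepA_eq (s : String) (m : List Int) (d : List Int) (hpre : Pre_spell_strength s m d)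
    (c : List Int) (hc : c.length = 26) (j : Nat) (hj : j < s.toList.length) :
    pvStepA s m d c (j : Int) =
      c.set (pvKey s m d j).toNat (c.getD (pvKey s m d j).toNat 0 + 1) := by
  obtain ⟨hlen, hP⟩ := hpre
  have hP' := hP j hj
  simp only [pvStepA, pvKey, PySem.List.pyGetD_natCast]
  by_cases h : m.getD j 0 = 0
  · rw [if_pos h] at hP'
    simp only [h, if_true]
    have hk1 : (-26 : Int) ≤ ((s.toList.getD j ' ').toNat : Int) - 97 := by omega
    have hk2 : ((s.toList.getD j ' ').toNat : Int) - 97 < 26 := by omega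
    rw [pvSetD26 c hc _ hk1 hk2, pvGetD26 c hc _ hk1 hk2]
  · rw [if_neg h] at hP'
    simp only [h, if_false]
    have hK1 : (-26 : Int) ≤ PySem.Int.mod ((((s.toList.getD j ' ').toNat : Int) - 97) + (m.getD j 0 - 1) * d.getD j 0) 26 := by
      rw [PySem.Int.mod_eq_emod_of_pos (by norm_num)]; omega
    have hK2 : PySem.Int.mod ((((s.toList.getD j ' ').toNat : Int) - 97) + (m.getD j 0 - 1) * d.getD j 0) 26 < 26 := by
      rw [PySem.Int.mod_eq_emod_of_pos (by norm_num)]; omega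
    rw [pvSetD26 c hc _ hK1 hK2, pvGetD26 c hc _ hK1 hK2]
    rw [show PySem.Int.mod (PySem.Int.mod ((((s.toList.getD j ' ').toNat : Int) - 97) + (m.getD j 0 - 1) * d.getD j 0) 26) 26
        = PySem.Int.mod ((((s.toList.getD j ' ').toNat : Int) - 97) + (m.getD j 0 - 1) * d.getD j 0) 26 from by
      rw [PySem.Int.mod_eq_emod_of_pos (by norm_num), PySem.Int.mod_eq_emod_of_pos (by norm_num)]; omega]

lemma pvInvA (s : String) (m : List Int) (d : List Int) (hpre : Pre_spell_strength s m d) :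
    ∀ j : Nat, j ≤ s.toList.length →
      ((PySem.List.pyRange 0 (j : Int) 1).foldl (pvStepA s m d) (List.replicate 26 (0 : Int))).length = 26 ∧
      ∀ b : Nat, b < 26 →
        (0 ≤ ((PySem.List.pyRange 0 (j : Int) 1).foldl (pvStepA s m d) (List.replicate 26 (0 : Int))).getD b 0) ∧
        (0 < ((PySem.List.pyRange 0 (j : Int) 1).foldl (pvStepA s m d) (List.replicate 26 (0 : Int))).getD b 0 ↔
          (b : Int) ∈ (PySem.List.pyRange 0 (j : Int) 1).map (pvKey s m d)) := by
  intro j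
  induction j with
  | zero =>
    intro _
    rw [show ((0 : Nat) : Int) = 0 from rfl, PySem.List.pyRange_one_eq_nil le_rfl]
    refine ⟨by simp, ?_⟩
    intro b hb
    simp only [List.foldl_nil, List.map_nil]
    rw [List.getD_replicate _ hb]
    simp
  | succ j ih =>
    intro hj1
    have hj : j < s.toList.length := by omega
    obtain ⟨ih1, ih2⟩ := ih (by omega)
    have hcast : (((j + 1 : Nat)) : Int) = (j : Int) + 1 := by push_cast; ring
    rw [hcast, PySem.List.pyRange_one_succ_right (Int.natCast_nonneg j), List.foldl_append,
      List.map_append, List.foldl_cons, List.foldl_nil,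
      pvStepA_eq s m d hpre _ ih1 j hj]
    set c := (PySem.List.pyRange 0 (j : Int) 1).foldl (pvStepA s m d) (List.replicate 26 (0 : Int)) with hcdef
    set K := pvKey s m d (j : Int) with hKdef
    have hKb := pvKey_bounds s m d (j : Int)
    have hKt : K.toNat < 26 := by omega
    have hc26 : c.length = 26 := ih1
    refine ⟨by simp [List.length_set, hc26], ?_⟩
    intro b hb
    have hbset : b < (c.set K.toNat (c.getD K.toNat 0 + 1)).length := by
      simp [List.length_set, hc26, hb]
    rw [List.getD_eq_getElem _ _ hbset, List.getElem_set]
    by_cases hbK : K.toNat = b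
    · rw [if_pos hbK]
      have h0 := (ih2 K.toNat hKt).1
      have hbi : (b : Int) = K := by omega
      constructor
      · omega
      · constructor
        · intro _
          simp only [List.map_cons, List.map_nil, List.mem_append, List.mem_singleton]
          exact Or.inr hbi
        · intro _
          omega
    · rw [if_neg hbK]
      rw [← List.getD_eq_getElem c 0 (show b < c.length by omega)]
      have hiff := ih2 b hb
      have hbK' : ¬ ((b : Int) = K) := by omega
      constructor
      · exact hiff.1
      · rw [hiff.2]
        simp only [List.map_cons, List.map_nil, List.mem_append, List.mem_singleton]
        constructor
        · exact Or.inl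
        · intro h
          rcases h with h | h
          · exact h
          · exact absurd h hbK'

lemma pvCount (c : List Int) (hc : c.length = 26) (S : List Int) (hS : S.Nodup)
    (hmem : ∀ b : Nat, b < 26 → (0 < c.getD b 0 ↔ (b : Int) ∈ S))
    (hbd : ∀ x ∈ S, 0 ≤ x ∧ x < 26) :
    c.foldl (fun strength count => if count > 0 then strength + 1 else strength) 0 = (S.length : Int) := by
  have hfold : c.foldl (fun strength count => if count > 0 then strength + 1 else strength) 0
      = ((c.countP (fun x => decide (0 < x)) : Nat) : Int) := by
    rw [show (fun (strength count : Int) => if count > 0 then strength + 1 else strength)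
        = (fun (acc x : Int) => if (fun y : Int => decide (0 < y)) x = true then acc + 1 else acc) from by
      funext a x; simp]
    rw [PySem.List.foldl_count_if]
    ring
  have hcmap : c = (List.range 26).map (fun b => c.getD b 0) := by
    apply List.ext_getElem
    · simp [hc]
    · intro i h1 h2
      rw [List.getElem_map, List.getElem_range,
        List.getD_eq_getElem c 0 (show i < c.length by simpa [hc] using h1)]
  have h2 : c.countP (fun x => decide (0 < x)) = (List.range 26).countP (fun b : Nat => decide ((b : Int) ∈ S)) := by
    conv_lhs => rw [hcmap]
    rw [List.countP_map]
    apply List.countP_congr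
    intro b hb
    have hiff := hmem b (List.mem_range.mp hb)
    simp only [Function.comp_apply, decide_eq_true_eq]
    exact hiff
  have hT : ((List.range 26).filter (fun b : Nat => decide ((b : Int) ∈ S))).Nodup :=
    List.Nodup.filter _ (List.nodup_range)
  have hmapN : (((List.range 26).filter (fun b : Nat => decide ((b : Int) ∈ S))).map
      (fun b : Nat => (b : Int))).Nodup :=
    hT.map (fun a b h => by exact_mod_cast h)
  have hperm : S.Perm (((List.range 26).filter (fun b : Nat => decide ((b : Int) ∈ S))).map
      (fun b : Nat => (b : Int))) := by
    rw [List.perm_ext_iff_of_nodup hS hmapN]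
    intro a
    simp only [List.mem_map, List.mem_filter, List.mem_range, decide_eq_true_eq]
    constructor
    · intro ha
      obtain ⟨h0, h26⟩ := hbd a ha
      refine ⟨a.toNat, ⟨by omega, ?_⟩, Int.toNat_of_nonneg h0⟩
      rwa [Int.toNat_of_nonneg h0]
    · rintro ⟨b, ⟨hb26, hbS⟩, rfl⟩
      exact hbS
  have hlen := hperm.length_eq
  rw [List.length_map] at hlen
  rw [hfold, h2, List.countP_eq_length_filter, ← hlen]

-- B's fold over zipped pairs is a countP.
lemma pvFoldCount (l : List (Int × Int)) (a0 : Int) :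
    l.foldl (fun changes pc => if pc.2 ≠ pc.1 then changes + 1 else changes) a0 =
      a0 + (l.countP (fun pc => decide (pc.2 ≠ pc.1)) : Int) := by
  induction l generalizing a0 with
  | nil => simp
  | cons p t ih =>
    rw [List.foldl_cons, ih, List.countP_cons]
    by_cases h : p.2 = p.1
    · simp [h]
    · simp [h]; ring

-- On a (≤)-sorted list, 1 + number of adjacent changes = number of distinct elements.
lemma pvBoundary (ks : List Int) (hs : ks.Pairwise (· ≤ ·)) (hne : ks ≠ []) :
    1 + ((ks.zip ks.tail).countP (fun pc => decide (pc.2 ≠ pc.1)) : Int) =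
      (ks.toFinset.card : Int) := by
  induction ks with
  | nil => exact absurd rfl hne
  | cons x xs ih =>
    cases xs with
    | nil => simp
    | cons y ys =>
      have hxall : ∀ z ∈ y :: ys, x ≤ z := fun z hz => (List.pairwise_cons.mp hs).1 z hz
      have htail : (y :: ys).Pairwise (· ≤ ·) := (List.pairwise_cons.mp hs).2
      have ihy := ih htail (by simp)
      have hzip : ((x :: y :: ys).zip (x :: y :: ys).tail) = (x, y) :: ((y :: ys).zip (y :: ys).tail) := rfl
      rw [hzip, List.countP_cons]
      by_cases hxy : x = y
      · subst hxy
        have hmem : x ∈ (x :: ys).toFinset := by simp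
        rw [show (x :: x :: ys).toFinset = (x :: ys).toFinset by simp [List.toFinset_cons]]
        rw [← ihy]
        simp
      · have hnotmem : x ∉ (y :: ys).toFinset := by
          simp only [List.mem_toFinset]
          intro hmem
          have h1 : x ≤ y := hxall y (by simp)
          have h2 : y ≤ x := by
            rcases List.mem_cons.mp hmem with h | h
            · exact h ▸ le_rfl
            · exact List.rel_of_pairwise_cons htail h
          exact hxy (le_antisymm h1 h2)
        rw [List.toFinset_cons, Finset.card_insert_of_notMem hnotmem]
        simp only [ne_eq, Ne.symm hxy, not_false_iff, decide_true, if_true]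
        push_cast
        push_cast at ihy
        linarith

-- ===== VERDICT (by name: the statement is the Claim_ definition above) =====
theorem spell_strength_spec : Claim_equal_spell_strength := by
  intro s m d _hdom hpre
  unfold Spec_spell_strength
  rw [spell_strength_eq, spell_strength_alt_eq]
  set ks := (PySem.List.pyRange 0 (s.toList.length : Int) 1).map (pvKey s m d) with hks
  obtain ⟨hlen, hb⟩ := pvInvA s m d hpre s.toList.length le_rfl
  have hbd : ∀ x ∈ PySem.Set.ofList ks, 0 ≤ x ∧ x < 26 := by
    intro x hx
    rw [PySem.Set.mem_ofList] at hx
    obtain ⟨i, _, rfl⟩ := List.mem_map.mp hx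
    exact pvKey_bounds s m d i
  have hAcard : ((PySem.Set.ofList ks).length : Int) = ((PySem.Set.ofList ks).toFinset.card : Int) := by
    rw [List.toFinset_card_of_nodup (PySem.Set.nodup_ofList ks)]
  have hfs : (PySem.Set.ofList ks).toFinset = ks.toFinset := by
    ext a
    simp [List.mem_toFinset, PySem.Set.mem_ofList]
  -- A's value is the number of distinct keys
  rw [pvCount _ hlen (PySem.Set.ofList ks) (PySem.Set.nodup_ofList ks)
    (fun b hb26 => (hb b hb26).2.trans (PySem.Set.mem_ofList ks _).symm) hbd,
    hAcard, hfs]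
  -- B's value: sorted boundary count
  set sk := PySem.List.sorted ks (fun x => x) false with hsk
  have hperm : sk.Perm ks := PySem.List.sorted_perm ks (fun x => x) false
  have hpair : sk.Pairwise (· ≤ ·) := by
    have := PySem.List.sorted_pairwise ks (fun x => x)
    simpa using this
  have hBfin : (if sk = [] then (0 : Int)
      else 1 + (sk.zip (PySem.List.slice sk (some 1) none)).foldl
        (fun changes pc => if pc.2 ≠ pc.1 then changes + 1 else changes) 0)
      = (sk.toFinset.card : Int) := by
    by_cases hnil : sk = []
    · rw [if_pos hnil, hnil]; simp
    · rw [if_neg hnil, PySem.List.slice_from_one, pvFoldCount, zero_add]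
      exact pvBoundary sk hpair hnil
  show (ks.toFinset.card : Int) =
    (if sk = [] then (0 : Int)
     else 1 + (sk.zip (PySem.List.slice sk (some 1) none)).foldl
       (fun changes pc => if pc.2 ≠ pc.1 then changes + 1 else changes) 0)
  rw [hBfin, show sk.toFinset = ks.toFinset from List.toFinset.ext_iff.mpr (fun x => hperm.mem_iff)]
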